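-- pv_equiv track=rewrite | github.com/Karan-Salunkhe/RA | Task_08_Bias_Detection/Scripts/experiment_design.py | choose_demo_players
-- ===== SOURCE A (Python) =====
-- def choose_demo_players(fallback_players: list[str]) -> list[str]:
--     """Pick three names deterministically for demographic block."""
--     if fallback_players:
--         base = fallback_players[:3]
--     else:
--         base = ["Player A", "Player B", "Player C"]
--     while len(base) < 3:
--         base.append(f"Player {chr(ord('A') + len(base))}")
--     return base[:3]
-- ===== SOURCE B (Python) =====
-- def choose_demo_players(fallback_players: list[str]) -> list[str]:
--     """Pick three names deterministically for demographic block."""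
--     return [fallback_players[i] if i < len(fallback_players)
--             else f"Player {chr(ord('A') + i)}"
--             for i in range(3)]
-- ===== Notes on version B (the rewrite author's own statement) =====
-- stated objective: simpler
-- what changed: Replaces the slice-then-pad-with-while strategy and the separate empty-input branch with a single position-indexed comprehension over range(3): slot i gets fallback_players[i] if it exists, else the padding name chr('A'+i).
import Mathlib
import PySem

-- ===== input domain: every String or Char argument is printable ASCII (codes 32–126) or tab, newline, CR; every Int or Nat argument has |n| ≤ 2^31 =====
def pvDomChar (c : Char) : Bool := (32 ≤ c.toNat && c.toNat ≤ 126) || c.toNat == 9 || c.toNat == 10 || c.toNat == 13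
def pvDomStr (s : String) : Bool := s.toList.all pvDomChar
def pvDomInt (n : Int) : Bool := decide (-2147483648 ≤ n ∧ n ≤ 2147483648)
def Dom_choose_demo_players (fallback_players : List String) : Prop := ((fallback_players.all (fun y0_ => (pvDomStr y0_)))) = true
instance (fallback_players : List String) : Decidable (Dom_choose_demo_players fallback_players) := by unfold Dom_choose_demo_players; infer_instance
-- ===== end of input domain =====

-- B replaces A's slice-then-pad-while (and its empty-input branch) with one position-indexed comprehension; objective: simpler.

-- ===== PORT A =====
-- the 'while len(base) < 3: base.append(...)' loop, as structural recursion on 3 - len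
def padA : Nat → List String → List String
  | 0, base => base
  | fuel + 1, base =>
    if base.length < 3 then
      padA fuel (base ++ ["Player " ++ String.ofList [Char.ofNat ('A'.toNat + base.length)]])
    else base

def choose_demo_players (fallback_players : List String) : List String :=
  let base :=
    if fallback_players ≠ [] then PySem.List.slice fallback_players none (some 3)
    else ["Player A", "Player B", "Player C"]
  PySem.List.slice (padA 3 base) none (some 3)

-- ===== PORT B =====
def choose_demo_players_alt (fallback_players : List String) : List String :=
  (List.range 3).map (fun i =>
    if i < fallback_players.length then fallback_players.getD i ""
    else "Player " ++ String.ofList [Char.ofNat ('A'.toNat + i)])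

-- ===== PRECONDITION & SPEC =====
def Spec_choose_demo_players (fallback_players : List String) (out : List String) : Prop := out = choose_demo_players_alt fallback_players
instance (fallback_players : List String) (out : List String) : Decidable (Spec_choose_demo_players fallback_players out) := by unfold Spec_choose_demo_players; infer_instance

-- ===== CLAIM (what is proved, stated in full; the proofs are below) =====
def Claim_equal_choose_demo_players : Prop := ∀ (fallback_players : List String), Dom_choose_demo_players fallback_players → Spec_choose_demo_players fallback_players (choose_demo_players fallback_players)

-- ===== LEMMAS AND PROOFS =====

-- ===== VERDICT (by name: the statement is the Claim_ definition above) =====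
theorem choose_demo_players_spec : Claim_equal_choose_demo_players := by
  intro xs _
  unfold Spec_choose_demo_players
  match xs with
  | [] => decide
  | [a] =>
    simp [choose_demo_players, choose_demo_players_alt, padA, PySem.List.slice,
      List.range, List.range.loop]
  | [a, b] =>
    simp [choose_demo_players, choose_demo_players_alt, padA, PySem.List.slice,
      List.range, List.range.loop]
  | a :: b :: c :: rest =>
    simp [choose_demo_players, choose_demo_players_alt, padA, PySem.List.slice,
      List.range, List.range.loop, List.take]
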